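-- pv_equiv track=rewrite | github.com/xinyiguan/chromaticism-codes | Code/metrics.py | min_distance_from_S_to_L
-- ===== SOURCE A (Python) =====
-- from typing import List, Optional, Literal
--
-- def all_Ls(S: List[int]) -> List[List[int]]:
--     """Given a list of integers S, we find all possible Ls (L: List[int])
--     we use a sliding window with length 7 to get all possible within the range of S.
--     """
--
--     possible_starting_pos_for_L = list(range(min(S), max(S) + 1))
--     Ls = [list(range(x, x + 7)) for x in possible_starting_pos_for_L]
--
--     return Ls
--
-- def distance_from_S_to_L(S: List[int], L: List[int]) -> int:
--     """
--     The distance of set S to set L is defined as: the number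
--     D(S, L) = sum of y in {S-L} of min(d(y, max L), d(y, min L))
--     :param S:
--     :param L:
--     :return:
--     """
--     result = sum([min(abs(y - min(L)), abs(y - max(L))) for y in S if y not in L])
--     return result
--
-- def min_distance_from_S_to_L(S: List[int]) -> int:
--     """
--     min_L D(S, L): the minimal distance from a TPC set S to a diatonic set L.
--     :param S:
--     :return:
--     """
--     if S is None:
--         raise ValueError('Missing data!')
--     if S == []:
--         return 0
--     else:
--         possible_Ls = all_Ls(S=S)
--         result = min([distance_from_S_to_L(S=S, L=L) for L in possible_Ls])
--     return result
-- ===== SOURCE B (Python) =====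
-- def min_distance_from_S_to_L(S):
--     """
--     min_L D(S, L): one pass over the window starts, updating the distance
--     incrementally from counts instead of recomputing it per window.
--     """
--     if S is None:
--         raise ValueError('Missing data!')
--     if S == []:
--         return 0
--     lo = min(S)
--     hi = max(S)
--     cnt = {}
--     for y in S:
--         cnt[y] = cnt.get(y, 0) + 1
--     # f(x) = sum over y in S of max(0, x - y, y - x - 6); f(lo) has no y below lo
--     cur = sum(y - lo - 6 for y in S if y > lo + 6)
--     c_le = 0                                  # count of y <= x - 1
--     c_ge = sum(1 for y in S if y >= lo + 7)   # count of y >= x + 7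
--     best = cur
--     for x in range(lo, hi):
--         c_le += cnt.get(x, 0)
--         cur += c_le - c_ge                    # now cur = f(x+1)
--         c_ge -= cnt.get(x + 7, 0)
--         if cur < best:
--             best = cur
--     return best
-- ===== Notes on version B (the rewrite author's own statement) =====
-- stated objective: faster
-- what changed: Instead of recomputing the distance of every 7-wide window from scratch (O(range*n)), B builds a value-count dictionary once and sweeps the window starts left to right, updating the distance incrementally from running below/above counts (O(range + n)).
import Mathlib
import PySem

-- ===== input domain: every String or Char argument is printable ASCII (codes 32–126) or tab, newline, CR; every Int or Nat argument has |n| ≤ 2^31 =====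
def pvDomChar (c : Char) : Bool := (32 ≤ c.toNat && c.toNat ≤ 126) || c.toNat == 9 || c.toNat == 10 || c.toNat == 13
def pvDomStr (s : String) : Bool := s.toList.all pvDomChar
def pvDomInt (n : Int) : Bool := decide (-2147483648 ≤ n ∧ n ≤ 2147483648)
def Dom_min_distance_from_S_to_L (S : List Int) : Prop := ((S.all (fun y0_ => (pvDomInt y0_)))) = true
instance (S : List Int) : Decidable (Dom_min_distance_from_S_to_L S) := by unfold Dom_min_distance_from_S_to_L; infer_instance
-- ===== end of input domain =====

-- B replaces the per-window recomputation (O(range·n)) by one incremental sliding pass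
-- driven by a value-count dictionary (O(range + n)): a different algorithm, measurably faster.

-- ===== PORT A =====
def all_Ls (S : List Int) : List (List Int) :=
  match PySem.List.min? S (fun y => y), PySem.List.max? S (fun y => y) with
  | some mn, some mx =>
      (PySem.List.pyRange mn (mx + 1) 1).map (fun x => PySem.List.pyRange x (x + 7) 1)
  | _, _ => []   -- min()/max() of [] would raise; unreachable from min_distance_from_S_to_L

def distance_from_S_to_L (S : List Int) (L : List Int) : Int :=
  match PySem.List.min? L (fun y => y), PySem.List.max? L (fun y => y) with
  | some mn, some mx =>
      ((S.filter (fun y => !(L.contains y))).map (fun y => min |y - mn| |y - mx|)).sum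
  | _, _ => 0   -- min()/max() of [] would raise; unreachable (L is always a 7-window)

def min_distance_from_S_to_L (S : List Int) : Int :=
  if S = [] then 0
  else
    match PySem.List.min? ((all_Ls S).map (fun L => distance_from_S_to_L S L)) (fun r => r) with
    | some r => r
    | none => 0   -- min([]) would raise; unreachable since all_Ls S ≠ [] when S ≠ []

-- ===== PORT B =====
def min_distance_from_S_to_L_alt (S : List Int) : Int :=
  if S = [] then 0
  else
    match PySem.List.min? S (fun y => y), PySem.List.max? S (fun y => y) with
    | some lo, some hi =>
        let cnt := S.foldl (fun d y => d.insert y (d.getD y 0 + 1)) PySem.Dict.empty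
        let cur := ((S.filter (fun y => decide (y > lo + 6))).map (fun y => y - lo - 6)).sum
        let cle : Int := 0
        let cge := ((S.filter (fun y => decide (y ≥ lo + 7))).map (fun _ => (1 : Int))).sum
        let st := (PySem.List.pyRange lo hi 1).foldl
          (fun (s : Int × Int × Int × Int) x =>
            let cle' := s.1 + cnt.getD x 0
            let cur' := s.2.2.1 + cle' - s.2.1
            let cge' := s.2.1 - cnt.getD (x + 7) 0
            let best' := if cur' < s.2.2.2 then cur' else s.2.2.2
            (cle', cge', cur', best'))
          (cle, cge, cur, cur)
        st.2.2.2
    | _, _ => 0   -- unreachable: S ≠ []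

-- ===== PRECONDITION & SPEC =====
def Spec_min_distance_from_S_to_L (S : List Int) (out : Int) : Prop := out = min_distance_from_S_to_L_alt S
instance (S : List Int) (out : Int) : Decidable (Spec_min_distance_from_S_to_L S out) := by unfold Spec_min_distance_from_S_to_L; infer_instance

-- ===== CLAIM (what is proved, stated in full; the proofs are below) =====
def Claim_equal_min_distance_from_S_to_L : Prop := ∀ (S : List Int), Dom_min_distance_from_S_to_L S → Spec_min_distance_from_S_to_L S (min_distance_from_S_to_L S)

-- ===== LEMMAS AND PROOFS =====

-- g x y: contribution of pitch y to the distance of the window starting at x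
def pvG (x y : Int) : Int := max 0 (max (x - y) (y - x - 6))

-- f S x: the distance of S to the window [x, x+6]
def pvF (S : List Int) (x : Int) : Int := (S.map (pvG x)).sum

def pvCntLe (S : List Int) (x : Int) : Int := ((S.filter (fun y => decide (y ≤ x))).length : Int)
def pvCntGe (S : List Int) (x : Int) : Int := ((S.filter (fun y => decide (x ≤ y))).length : Int)

theorem pv_sum_filter_map (S : List Int) (p : Int → Bool) (h : Int → Int) :
    ((S.filter p).map h).sum = (S.map (fun y => if p y then h y else 0)).sum := by
  induction S with
  | nil => rfl
  | cons a t ih =>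
    by_cases hp : p a <;> simp [hp, ih]

theorem pv_range7 (x : Int) :
    PySem.List.pyRange x (x + 7) 1 = [x, x+1, x+2, x+3, x+4, x+5, x+6] := by
  rw [PySem.List.pyRange_one]
  have : (x + 7 - x).toNat = 7 := by omega
  rw [this]
  simp [List.range_succ]

theorem pv_point (x y : Int) :
    (if x ≤ y ∧ y ≤ x + 6 then (0 : Int) else min |y - x| |y - (x + 6)|) = pvG x y := by
  unfold pvG
  rcases abs_cases (y - x) with ⟨h1, _⟩ | ⟨h1, _⟩ <;>
    rcases abs_cases (y - (x + 6)) with ⟨h3, _⟩ | ⟨h3, _⟩ <;>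
      rw [h1, h3] <;> split_ifs <;> omega

theorem pv_dist_eq (S : List Int) (x : Int) :
    distance_from_S_to_L S (PySem.List.pyRange x (x + 7) 1) = pvF S x := by
  rw [pv_range7]
  have hmin : PySem.List.min? [x, x+1, x+2, x+3, x+4, x+5, x+6] (fun y => y) = some x := by
    rw [PySem.List.min?_id_cons]
    simp only [List.foldl]
    congr 1
    omega
  have hmax : PySem.List.max? [x, x+1, x+2, x+3, x+4, x+5, x+6] (fun y => y) = some (x + 6) := by
    rw [PySem.List.max?_id_cons]
    simp only [List.foldl]
    congr 1
    omega
  have hcon : ∀ y : Int, ([x, x+1, x+2, x+3, x+4, x+5, x+6].contains y)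
      = decide (x ≤ y ∧ y ≤ x + 6) := by
    intro y
    by_cases h : x ≤ y ∧ y ≤ x + 6 <;> simp [h] <;> omega
  unfold distance_from_S_to_L
  rw [hmin, hmax]
  dsimp only
  rw [pv_sum_filter_map]
  unfold pvF
  congr 1
  apply List.map_congr_left
  intro y _
  rw [hcon y, ← pv_point x y]
  by_cases h : x ≤ y ∧ y ≤ x + 6 <;> simp [h]

theorem pv_delta (S : List Int) (x : Int) :
    pvF S (x + 1) = pvF S x + pvCntLe S x - pvCntGe S (x + 7) := by
  induction S with
  | nil => simp [pvF, pvCntLe, pvCntGe]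
  | cons a t ih =>
    simp only [pvF, pvCntLe, pvCntGe, List.map_cons, List.sum_cons, List.filter_cons] at *
    by_cases h1 : a ≤ x <;> by_cases h2 : x + 7 ≤ a <;>
      simp [h1, h2, pvG] <;> omega

theorem pv_cntLe_succ (S : List Int) (x : Int) :
    pvCntLe S x = pvCntLe S (x - 1) + (S.count x : Int) := by
  induction S with
  | nil => simp [pvCntLe]
  | cons a t ih =>
    have hb : (fun y : Int => decide (y ≤ x - 1)) = (fun y => decide (y < x)) := by
      funext y; simp only [decide_eq_decide]; omega
    simp only [pvCntLe, List.filter_cons, List.count_cons, hb] at *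
    split_ifs <;> simp_all <;> omega

theorem pv_cntGe_pred (S : List Int) (x : Int) :
    pvCntGe S (x + 1) = pvCntGe S x - (S.count x : Int) := by
  induction S with
  | nil => simp [pvCntGe]
  | cons a t ih =>
    have hb : (fun y : Int => decide (x + 1 ≤ y)) = (fun y => decide (x < y)) := by
      funext y; simp only [decide_eq_decide]; omega
    simp only [pvCntGe, List.filter_cons, List.count_cons, hb] at *
    split_ifs <;> simp_all <;> omega

theorem pv_sum_ones (l : List Int) : (l.map (fun _ => (1 : Int))).sum = (l.length : Int) := by
  induction l with
  | nil => rfl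
  | cons a t ih => simp; omega

theorem pv_loop (S : List Int) (cnt : PySem.Dict Int Int)
    (hcnt : ∀ v, cnt.getD v 0 = (S.count v : Int)) (n : Nat) :
    ∀ (a best : Int),
    ((PySem.List.pyRange a (a + (n : Int)) 1).foldl
      (fun (s : Int × Int × Int × Int) x =>
        (s.1 + cnt.getD x 0,
         s.2.1 - cnt.getD (x + 7) 0,
         s.2.2.1 + (s.1 + cnt.getD x 0) - s.2.1,
         if s.2.2.1 + (s.1 + cnt.getD x 0) - s.2.1 < s.2.2.2
           then s.2.2.1 + (s.1 + cnt.getD x 0) - s.2.1 else s.2.2.2))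
      (pvCntLe S (a - 1), pvCntGe S (a + 7), pvF S a, best)).2.2.2
    = ((PySem.List.pyRange (a + 1) (a + (n : Int) + 1) 1).map (pvF S)).foldl
        (fun b v => if v < b then v else b) best := by
  induction n with
  | zero =>
    intro a best
    rw [show a + ((0 : Nat) : Int) = a by omega]
    rw [PySem.List.pyRange_one_eq_nil (le_refl a),
        PySem.List.pyRange_one_eq_nil (by omega : a + 1 ≥ a + 1)]
    rfl
  | succ n ih =>
    intro a best
    rw [PySem.List.pyRange_one_cons (by omega : a < a + ((n + 1 : Nat) : Int))]
    rw [List.foldl_cons]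
    dsimp only
    have h1 : pvCntLe S (a - 1) + cnt.getD a 0 = pvCntLe S a := by
      rw [hcnt]; rw [pv_cntLe_succ S a]
    have h2 : pvF S a + pvCntLe S a - pvCntGe S (a + 7) = pvF S (a + 1) := by
      rw [pv_delta]
    have h3 : pvCntGe S (a + 7) - cnt.getD (a + 7) 0 = pvCntGe S (a + 8) := by
      rw [hcnt]; rw [show (a + 8 : Int) = (a + 7) + 1 by ring, pv_cntGe_pred S (a + 7)]
    rw [h1, h2, h3]
    have hstate : (pvCntLe S a, pvCntGe S (a + 8), pvF S (a + 1),
        if pvF S (a + 1) < best then pvF S (a + 1) else best)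
        = (pvCntLe S ((a + 1) - 1), pvCntGe S ((a + 1) + 7), pvF S (a + 1),
        if pvF S (a + 1) < best then pvF S (a + 1) else best) := by
      rw [show ((a + 1) - 1 : Int) = a by ring, show ((a + 1) + 7 : Int) = a + 8 by ring]
    rw [show a + ((n + 1 : Nat) : Int) = (a + 1) + (n : Int) by push_cast; ring]
    rw [hstate, ih (a + 1) (if pvF S (a + 1) < best then pvF S (a + 1) else best)]
    rw [PySem.List.pyRange_one_cons (by omega : a + 1 < (a + 1) + (n : Int) + 1)]
    rw [List.map_cons, List.foldl_cons]

-- ===== VERDICT (by name: the statement is the Claim_ definition above) =====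
theorem min_distance_from_S_to_L_spec : Claim_equal_min_distance_from_S_to_L := by
  unfold Claim_equal_min_distance_from_S_to_L Spec_min_distance_from_S_to_L
  intro S _
  by_cases hS : S = []
  · simp [min_distance_from_S_to_L, min_distance_from_S_to_L_alt, hS]
  · cases hlo : PySem.List.min? S (fun y => y) with
    | none => exact absurd ((PySem.List.min?_eq_none_iff S (fun y => y)).mp hlo) hS
    | some lo =>
    cases hhi : PySem.List.max? S (fun y => y) with
    | none => exact absurd ((PySem.List.max?_eq_none_iff S (fun y => y)).mp hhi) hS
    | some hi =>
    have hlomin : ∀ y ∈ S, lo ≤ y := PySem.List.min?_isMin hlo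
    have hhimax : ∀ y ∈ S, y ≤ hi := PySem.List.max?_isMax hhi
    have hlohi : lo ≤ hi := hhimax lo (PySem.List.min?_mem hlo)
    obtain ⟨n, hn⟩ : ∃ n : Nat, hi = lo + (n : Int) := ⟨(hi - lo).toNat, by omega⟩
    have hcntfact : ∀ v, (S.foldl (fun d y => d.insert y (d.getD y 0 + 1)) PySem.Dict.empty).getD v 0
        = (S.count v : Int) := fun v => by
      rw [PySem.Dict.getD_foldl_insert_add_one, PySem.Dict.getD_empty]; ring
    have hcur : ((S.filter (fun y => decide (y > lo + 6))).map (fun y => y - lo - 6)).sum = pvF S lo := by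
      rw [pv_sum_filter_map]
      unfold pvF
      congr 1
      apply List.map_congr_left
      intro y hy
      have := hlomin y hy
      by_cases h : y > lo + 6 <;> simp [h, pvG] <;> omega
    have hcge : ((S.filter (fun y => decide (y ≥ lo + 7))).map (fun _ => (1 : Int))).sum
        = pvCntGe S (lo + 7) := by
      rw [pv_sum_ones]
      unfold pvCntGe
      congr 2
    have hcle : pvCntLe S (lo - 1) = (0 : Int) := by
      unfold pvCntLe
      rw [List.filter_eq_nil_iff.mpr]
      · rfl
      · intro y hy
        have := hlomin y hy
        simp only [decide_eq_true_eq]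
        omega
    -- A side
    unfold min_distance_from_S_to_L all_Ls
    rw [if_neg hS, hlo, hhi]
    dsimp only
    have hlist : (((PySem.List.pyRange lo (hi + 1) 1).map (fun x => PySem.List.pyRange x (x + 7) 1)).map
        (fun L => distance_from_S_to_L S L)) = (PySem.List.pyRange lo (hi + 1) 1).map (pvF S) := by
      rw [List.map_map]
      apply List.map_congr_left
      intro x _
      exact pv_dist_eq S x
    rw [hlist]
    rw [PySem.List.pyRange_one_cons (by omega : lo < hi + 1), List.map_cons]
    rw [PySem.List.min?_id_cons]
    dsimp only
    -- B side
    unfold min_distance_from_S_to_L_alt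
    rw [if_neg hS, hlo, hhi]
    dsimp only
    rw [hcur, hcge]
    have hinit : ((0 : Int), pvCntGe S (lo + 7), pvF S lo, pvF S lo)
        = (pvCntLe S (lo - 1), pvCntGe S (lo + 7), pvF S lo, pvF S lo) := by rw [hcle]
    rw [hinit, hn]
    rw [pv_loop S (S.foldl (fun d y => d.insert y (d.getD y 0 + 1)) PySem.Dict.empty) hcntfact n lo (pvF S lo)]
    have hminf : (fun (b v : Int) => if v < b then v else b) = min := by
      funext b v
      rw [min_def]
      split_ifs <;> omega
    rw [hminf]
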